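-- pv_equiv track=rewrite | github.com/OoDBag/VideoMindPalace | videomindpalace/build_graph.py | get_uncovered_ranges
-- ===== SOURCE A (Python) =====
-- def get_uncovered_ranges(covered_frames, total_frames=180):
--     """
--     Find ranges of frames that are not covered by any interaction.
--
--     Args:
--         covered_frames: Dictionary with frame numbers as keys
--         total_frames: Total number of frames to consider
--
--     Returns:
--         List of [start_frame, end_frame] ranges that are not covered
--     """
--     uncovered_ranges = []
--     start = None
--
--     # Check each frame from 1 to total_frames
--     for i in range(1, total_frames + 1):
--         if i not in covered_frames:
--             if start is None:
--                 start = i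
--         else:
--             if start is not None:
--                 uncovered_ranges.append([start, i - 1])
--                 start = None
--
--     # Handle the case where the last frames are uncovered
--     if start is not None:
--         uncovered_ranges.append([start, total_frames])
--
--     return uncovered_ranges
-- ===== SOURCE B (Python) =====
-- def get_uncovered_ranges(covered_frames, total_frames=180):
--     """Gap scan over the sorted covered keys instead of testing every frame."""
--     boundaries = sorted({k for k in covered_frames if 1 <= k <= total_frames})
--     ranges = []
--     prev = 0
--     for k in boundaries:
--         if k > prev + 1:
--             ranges.append([prev + 1, k - 1])
--         prev = k
--     if prev < total_frames:
--         ranges.append([prev + 1, total_frames])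
--     return ranges
-- ===== Notes on version B (the rewrite author's own statement) =====
-- stated objective: alternative
-- what changed: Replaces A's per-frame state-machine scan over range(1, total_frames+1) with a gap scan over the sorted set of covered keys clipped to [1, total_frames], emitting the gap before each key and the trailing gap.
import Mathlib
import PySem

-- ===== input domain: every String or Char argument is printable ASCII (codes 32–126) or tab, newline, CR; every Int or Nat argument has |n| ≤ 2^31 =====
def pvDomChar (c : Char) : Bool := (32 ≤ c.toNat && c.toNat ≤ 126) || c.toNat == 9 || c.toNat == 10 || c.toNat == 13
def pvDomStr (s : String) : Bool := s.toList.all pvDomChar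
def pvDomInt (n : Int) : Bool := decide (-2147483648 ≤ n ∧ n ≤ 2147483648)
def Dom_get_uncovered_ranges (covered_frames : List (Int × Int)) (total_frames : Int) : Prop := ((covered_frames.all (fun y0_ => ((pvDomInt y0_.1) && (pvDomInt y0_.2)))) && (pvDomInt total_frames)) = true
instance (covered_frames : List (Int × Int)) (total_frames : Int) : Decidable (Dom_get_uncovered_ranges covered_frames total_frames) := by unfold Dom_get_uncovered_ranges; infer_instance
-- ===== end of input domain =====

-- B replaces A's per-frame scan with a gap scan over the sorted covered keys (same return value, different algorithm).


-- ===== PORT A =====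
-- one step of A's for-loop body: state = (uncovered_ranges, start)
def pvAStep (covered_frames : List (Int × Int)) (st : List (List Int) × Option Int) (i : Int) :
    List (List Int) × Option Int :=
  if !((PySem.Dict.mk covered_frames).contains i) then
    match st.2 with
    | none => (st.1, some i)
    | some _ => st
  else
    match st.2 with
    | some s => (st.1 ++ [[s, i - 1]], none)
    | none => st

def get_uncovered_ranges (covered_frames : List (Int × Int)) (total_frames : Int) : List (List Int) :=
  let r := (PySem.List.pyRange 1 (total_frames + 1)).foldl (pvAStep covered_frames) ([], none)
  match r.2 with
  | some s => r.1 ++ [[s, total_frames]]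
  | none => r.1

-- ===== PORT B =====
-- sorted({k for k in covered_frames if 1 <= k <= total_frames})
def pvBoundaries (covered_frames : List (Int × Int)) (total_frames : Int) : List Int :=
  PySem.List.sorted
    (PySem.Set.ofList
      (((PySem.Dict.mk covered_frames).keys).filter
        (fun k => decide (1 ≤ k) && decide (k ≤ total_frames))))
    (fun x => x)

-- one step of B's for-loop body: state = (ranges, prev)
def pvBStep (st : List (List Int) × Int) (k : Int) : List (List Int) × Int :=
  if st.2 + 1 < k then (st.1 ++ [[st.2 + 1, k - 1]], k) else (st.1, k)

def get_uncovered_ranges_alt (covered_frames : List (Int × Int)) (total_frames : Int) : List (List Int) :=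
  let r := (pvBoundaries covered_frames total_frames).foldl pvBStep ([], 0)
  if r.2 < total_frames then r.1 ++ [[r.2 + 1, total_frames]] else r.1

-- ===== PRECONDITION & SPEC =====
def Spec_get_uncovered_ranges (covered_frames : List (Int × Int)) (total_frames : Int) (out : List (List Int)) : Prop := out = get_uncovered_ranges_alt covered_frames total_frames
instance (covered_frames : List (Int × Int)) (total_frames : Int) (out : List (List Int)) : Decidable (Spec_get_uncovered_ranges covered_frames total_frames out) := by unfold Spec_get_uncovered_ranges; infer_instance

-- ===== CLAIM (what is proved, stated in full; the proofs are below) =====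
def Claim_equal_get_uncovered_ranges : Prop := ∀ (covered_frames : List (Int × Int)) (total_frames : Int), Dom_get_uncovered_ranges covered_frames total_frames → Spec_get_uncovered_ranges covered_frames total_frames (get_uncovered_ranges covered_frames total_frames)

-- ===== LEMMAS AND PROOFS =====

-- boundaries for bound n+1 are the boundaries for bound n, extended with n+1 exactly when n+1 is a covered key
lemma pvBoundaries_succ (c : List (Int × Int)) (n : Nat) :
    pvBoundaries c ((n : Int) + 1)
      = if (PySem.Dict.mk c).contains ((n : Int) + 1)
        then pvBoundaries c (n : Int) ++ [(n : Int) + 1]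
        else pvBoundaries c (n : Int) := by
  have hmem : ∀ x : Int, x ∈ pvBoundaries c (n : Int) → (1 ≤ x ∧ x ≤ (n : Int)) ∧ x ∈ (PySem.Dict.mk c).keys := by
    intro x hx
    unfold pvBoundaries at hx
    rw [PySem.List.mem_sorted] at hx
    rw [PySem.Set.mem_ofList, List.mem_filter] at hx
    refine ⟨?_, hx.1⟩
    have := hx.2
    simp only [Bool.and_eq_true, decide_eq_true_eq] at this
    exact this
  by_cases hc : (PySem.Dict.mk c).contains ((n : Int) + 1) = true
  · rw [if_pos hc]
    apply PySem.List.sorted_eq_of_perm_of_pairwise_lt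
    · -- permutation: same members, both nodup
      have hnd1 : (pvBoundaries c (n : Int) ++ [(n : Int) + 1]).Nodup := by
        refine List.Nodup.append ?_ (List.nodup_singleton _) ?_
        · unfold pvBoundaries
          exact (PySem.List.sorted_perm _ _ _).nodup_iff.mpr (PySem.Set.nodup_ofList _)
        · intro x hx hy
          rcases List.mem_singleton.mp hy with rfl
          have := (hmem _ hx).1
          omega
      have hnd2 : (PySem.Set.ofList (((PySem.Dict.mk c).keys).filter
          (fun k => decide (1 ≤ k) && decide (k ≤ (n : Int) + 1)))).Nodup := PySem.Set.nodup_ofList _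
      refine (List.perm_ext_iff_of_nodup hnd1 hnd2).mpr ?_
      intro a
      rw [List.mem_append, List.mem_singleton, PySem.Set.mem_ofList, List.mem_filter]
      simp only [Bool.and_eq_true, decide_eq_true_eq]
      constructor
      · rintro (ha | rfl)
        · have := hmem _ ha
          exact ⟨this.2, this.1.1, by omega⟩
        · have : ((n : Int) + 1) ∈ (PySem.Dict.mk c).keys := by
            unfold PySem.Dict.contains at hc
            simp only [List.any_eq_true, beq_iff_eq] at hc
            obtain ⟨p, hp, hpe⟩ := hc
            unfold PySem.Dict.keys
            exact List.mem_map.mpr ⟨p, hp, hpe⟩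
          exact ⟨this, by omega, le_refl _⟩
      · rintro ⟨hk, h1, h2⟩
        by_cases he : a = (n : Int) + 1
        · exact Or.inr he
        · left
          unfold pvBoundaries
          rw [PySem.List.mem_sorted, PySem.Set.mem_ofList, List.mem_filter]
          refine ⟨hk, ?_⟩
          simp only [Bool.and_eq_true, decide_eq_true_eq]
          exact ⟨h1, by omega⟩
    · -- strictly increasing
      rw [List.pairwise_append]
      refine ⟨?_, List.pairwise_singleton _ _, ?_⟩
      · unfold pvBoundaries
        exact PySem.List.sorted_ofList_pairwise_lt _
      · intro x hx y hy
        rcases List.mem_singleton.mp hy with rfl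
        have := (hmem _ hx).1
        omega
  · rw [if_neg hc]
    unfold pvBoundaries
    congr 1
    apply congrArg
    apply List.filter_congr
    intro k hk
    have hne : k ≠ (n : Int) + 1 := by
      intro h
      apply hc
      unfold PySem.Dict.contains
      unfold PySem.Dict.keys at hk
      simp only [List.any_eq_true, beq_iff_eq]
      obtain ⟨p, hp, hpe⟩ := List.mem_map.mp hk
      exact ⟨p, hp, by omega⟩
    have h2 : (decide (k ≤ (n : Int) + 1)) = (decide (k ≤ (n : Int))) := by
      simp only [decide_eq_decide]
      omega
    rw [h2]

lemma pvBStep_eq (st : List (List Int) × Int) (k : Int) :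
    pvBStep st k = if st.2 + 1 < k then (st.1 ++ [[st.2 + 1, k - 1]], k) else (st.1, k) := rfl

lemma pvAStep_covered (c : List (Int × Int)) (st : List (List Int) × Option Int) (i : Int)
    (h : (PySem.Dict.mk c).contains i = true) :
    pvAStep c st i = match st.2 with
      | some s => (st.1 ++ [[s, i - 1]], none)
      | none => st := by
  unfold pvAStep
  rw [h]
  simp

lemma pvAStep_uncovered (c : List (Int × Int)) (st : List (List Int) × Option Int) (i : Int)
    (h : (PySem.Dict.mk c).contains i = false) :
    pvAStep c st i = match st.2 with
      | none => (st.1, some i)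
      | some _ => st := by
  unfold pvAStep
  rw [h]
  simp

-- the joint loop invariant: A's state after frames 1..n, expressed through B's fold over the boundaries ≤ n
lemma pvMain (c : List (Int × Int)) (n : Nat) :
    ((PySem.List.pyRange 1 ((n : Int) + 1)).foldl (pvAStep c) ([], none)
      = (((pvBoundaries c (n : Int)).foldl pvBStep ([], 0)).1,
         if ((pvBoundaries c (n : Int)).foldl pvBStep ([], 0)).2 = (n : Int) then none
         else some (((pvBoundaries c (n : Int)).foldl pvBStep ([], 0)).2 + 1)))
    ∧ 0 ≤ ((pvBoundaries c (n : Int)).foldl pvBStep ([], 0)).2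
    ∧ ((pvBoundaries c (n : Int)).foldl pvBStep ([], 0)).2 ≤ (n : Int) := by
  induction n with
  | zero =>
      have hb : pvBoundaries c (0 : Int) = [] := by
        unfold pvBoundaries
        have : (((PySem.Dict.mk c).keys).filter
            (fun k => decide (1 ≤ k) && decide (k ≤ (0 : Int)))) = [] := by
          apply List.filter_eq_nil_iff.mpr
          intro k _
          simp only [Bool.and_eq_true, decide_eq_true_eq, not_and]
          omega
        rw [this]
        rfl
      simp [hb, PySem.List.pyRange]
  | succ m ih =>
      obtain ⟨hA, hlo, hhi⟩ := ih
      have hrange : PySem.List.pyRange 1 ((↑(m + 1) : Int) + 1)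
          = PySem.List.pyRange 1 ((m : Int) + 1) ++ [(m : Int) + 1] := by
        push_cast
        exact PySem.List.pyRange_one_succ_right (by omega)
      rw [hrange, List.foldl_concat, hA]
      have hcast : (↑(m + 1) : Int) = (m : Int) + 1 := by push_cast; ring
      rw [hcast, pvBoundaries_succ c m]
      set B := (pvBoundaries c (m : Int)).foldl pvBStep ([], 0) with hB
      by_cases hc : (PySem.Dict.mk c).contains ((m : Int) + 1) = true
      · rw [if_pos hc, List.foldl_concat, ← hB, pvAStep_covered c _ _ hc, pvBStep_eq]
        by_cases hp : B.2 = (m : Int)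
        · rw [if_neg (show ¬ B.2 + 1 < (m : Int) + 1 by omega)]
          refine ⟨?_, by simp; omega, by simp⟩
          rw [if_pos hp]
          simp
        · have hlt : B.2 < (m : Int) := lt_of_le_of_ne hhi hp
          rw [if_pos (show B.2 + 1 < (m : Int) + 1 by omega)]
          refine ⟨?_, by simp; omega, by simp⟩
          rw [if_neg hp]
          simp
      · rw [if_neg hc, ← hB, pvAStep_uncovered c _ _ ((Bool.not_eq_true _).mp hc)]
        refine ⟨?_, hlo, by omega⟩
        by_cases hp : B.2 = (m : Int)
        · rw [if_pos hp, if_neg (show ¬ B.2 = (m : Int) + 1 by omega)]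
          simp [hp]
        · have hlt : B.2 < (m : Int) := lt_of_le_of_ne hhi hp
          rw [if_neg hp, if_neg (show ¬ B.2 = (m : Int) + 1 by omega)]

-- ===== VERDICT (by name: the statement is the Claim_ definition above) =====
theorem get_uncovered_ranges_spec : Claim_equal_get_uncovered_ranges := by
  intro c t _
  unfold Spec_get_uncovered_ranges
  by_cases ht : 0 ≤ t
  · obtain ⟨n, rfl⟩ : ∃ n : Nat, t = (n : Int) := ⟨t.toNat, (Int.toNat_of_nonneg ht).symm⟩
    obtain ⟨hA, hlo, hhi⟩ := pvMain c n
    unfold get_uncovered_ranges get_uncovered_ranges_alt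
    rw [hA]
    set B := (pvBoundaries c (n : Int)).foldl pvBStep ([], 0) with hB
    by_cases hp : B.2 = (n : Int)
    · rw [if_pos hp, if_neg (by omega)]
    · rw [if_neg hp]
      have hlt : B.2 < (n : Int) := lt_of_le_of_ne hhi hp
      rw [if_pos hlt]
  · -- total_frames < 0: A's range and B's boundary list are both empty
    have hb : pvBoundaries c t = [] := by
      unfold pvBoundaries
      have : (((PySem.Dict.mk c).keys).filter
          (fun k => decide (1 ≤ k) && decide (k ≤ t))) = [] := by
        apply List.filter_eq_nil_iff.mpr
        intro k _
        simp only [Bool.and_eq_true, decide_eq_true_eq, not_and]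
        omega
      rw [this]
      rfl
    have hr : PySem.List.pyRange 1 (t + 1) = [] := by
      unfold PySem.List.pyRange
      rw [if_neg (by norm_num : ¬(1 : Int) = 0), if_pos (by norm_num : (0 : Int) < 1),
          if_neg (by omega : ¬(1 : Int) < t + 1)]
      simp
    unfold get_uncovered_ranges get_uncovered_ranges_alt
    rw [hb, hr]
    simp only [List.foldl_nil]
    rw [if_neg (by omega)]
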